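-- pv_equiv track=rewrite | github.com/alexandraback/datacollection | solutions_5669245564223488_0/Python/shakhray/B.py | check
-- ===== SOURCE A (Python) =====
-- def check(string):
--     elems = []
--     for elem in string:
--         if elem not in elems:
--             elems.append(elem)
--     for elem in elems:
--         i = string.index(elem)
--         while i < len(string) and string[i] == elem:
--             i += 1
--         string = string[:string.index(elem)] + string[i:]
--         if elem in string:
--             return 0
--     return 1
-- ===== SOURCE B (Python) =====
-- def check(string):
--     # Single pass: a character may only repeat immediately; if a char starts a
--     # new run but was already seen in an earlier (finished) run, fail.
--     prev = None
--     seen = set()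
--     for ch in string:
--         if ch != prev:
--             if ch in seen:
--                 return 0
--             seen.add(ch)
--             prev = ch
--     return 1
-- ===== Notes on version B (the rewrite author's own statement) =====
-- stated objective: faster
-- what changed: Replaced the quadratic per-character index/slice-and-rescan loop by one left-to-right pass that tracks the set of characters whose run has started and fails when a character reappears after its run ended.
import Mathlib
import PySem

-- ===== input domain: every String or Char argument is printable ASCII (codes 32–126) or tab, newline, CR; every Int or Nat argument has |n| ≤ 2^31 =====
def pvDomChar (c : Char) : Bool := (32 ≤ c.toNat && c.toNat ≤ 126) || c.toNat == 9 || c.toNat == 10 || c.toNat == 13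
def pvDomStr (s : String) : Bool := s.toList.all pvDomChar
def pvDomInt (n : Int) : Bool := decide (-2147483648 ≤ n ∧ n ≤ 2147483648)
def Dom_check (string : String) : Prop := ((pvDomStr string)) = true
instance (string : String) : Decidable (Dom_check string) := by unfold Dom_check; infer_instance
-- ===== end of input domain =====

-- B replaces A's quadratic per-character index/slice-and-rescan loop by one linear left-to-right pass.

-- ===== PORT A =====
-- while i < len(string) and string[i] == elem: i += 1   (the index is always in range when read)
def checkAdvance (l : List Char) (c : Char) (i : Nat) : Nat :=
  if h : i < l.length ∧ l.getD i default = c then checkAdvance l c (i + 1) else i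
termination_by l.length - i
decreasing_by omega

-- for elem in elems: … (string is rebuilt across iterations; string.index(elem) always
-- succeeds when reached — elem is only removed in its own iteration — so idxOf is exact here)
def checkLoop : List Char → List Char → Int
  | [], _ => 1
  | e :: rest, s =>
    let j := List.idxOf e s
    let i := checkAdvance s e j
    let s' := s.take j ++ s.drop i
    if e ∈ s' then 0 else checkLoop rest s'

def check (string : String) : Int :=
  let l := string.toList
  checkLoop (l.foldl (fun acc e => if e ∈ acc then acc else acc ++ [e]) []) l

-- ===== PORT B =====
def checkAltLoop : List Char → Option Char → PySem.Set Char → Int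
  | [], _, _ => 1
  | c :: t, prev, seen =>
    if some c ≠ prev then
      if PySem.Set.contains seen c then 0
      else checkAltLoop t (some c) (PySem.Set.add seen c)
    else checkAltLoop t prev seen

def check_alt (string : String) : Int :=
  checkAltLoop string.toList none PySem.Set.empty

-- ===== PRECONDITION & SPEC =====
def Spec_check (string : String) (out : Int) : Prop := out = check_alt string
instance (string : String) (out : Int) : Decidable (Spec_check string out) := by unfold Spec_check; infer_instance

-- ===== CLAIM (what is proved, stated in full; the proofs are below) =====
def Claim_equal_check : Prop := ∀ (string : String), Dom_check string → Spec_check string (check string)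

-- ===== LEMMAS AND PROOFS =====

-- common run-by-run reference loop: both ports are reduced to it
def runCheck : List Char → PySem.Set Char → Int
  | [], _ => 1
  | c :: t, seen =>
    if PySem.Set.contains seen c then 0
    else runCheck (t.dropWhile (· == c)) (PySem.Set.add seen c)
termination_by l => l.length
decreasing_by
  simpa using Nat.lt_succ_of_le (List.length_dropWhile_le _ _)

-- the while loop advances to the end of the run of c starting at i
theorem checkAdvance_eq (l : List Char) (c : Char) (i : Nat) :
    checkAdvance l c i = i + ((l.drop i).takeWhile (· == c)).length := by
  rw [checkAdvance]
  by_cases h : i < l.length ∧ l.getD i default = c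
  · rw [dif_pos h, checkAdvance_eq]
    have hdrop : l.drop i = l[i] :: l.drop (i + 1) := List.drop_eq_getElem_cons h.1
    have hget : l[i] = c := by
      have := h.2; rwa [List.getD_eq_getElem l default h.1] at this
    rw [hdrop, List.takeWhile_cons, hget]
    simp
    omega
  · rw [dif_neg h]
    rw [not_and] at h
    by_cases hi : i < l.length
    · have hget := h hi
      have hdrop : l.drop i = l[i] :: l.drop (i + 1) := List.drop_eq_getElem_cons hi
      have heq : l[i] = l.getD i default := (List.getD_eq_getElem l default hi).symm
      have hbc : (l[i] == c) = false := by
        rw [beq_eq_false_iff_ne, heq]; exact hget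
      rw [hdrop, List.takeWhile_cons, hbc]
      simp
    · have : l.drop i = [] := List.drop_eq_nil_of_le (by omega)
      simp [this]
termination_by l.length - i
decreasing_by omega

theorem drop_length_takeWhile (l : List Char) (p : Char → Bool) :
    l.drop (l.takeWhile p).length = l.dropWhile p := by
  induction l with
  | nil => rfl
  | cons a t ih =>
    by_cases h : p a
    · simp [h, ih]
    · simp [h]

-- dedup-fold helpers
theorem foldl_dedup_prefix (l acc : List Char) :
    ∃ z, l.foldl (fun a e => if e ∈ a then a else a ++ [e]) acc = acc ++ z := by
  induction l generalizing acc with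
  | nil => exact ⟨[], by simp⟩
  | cons a t ih =>
    by_cases h : a ∈ acc
    · simpa [h] using ih acc
    · obtain ⟨z, hz⟩ := ih (acc ++ [a])
      exact ⟨a :: z, by simp [h, hz]⟩

theorem foldl_dedup_all_mem (l acc : List Char) (h : ∀ x ∈ l, x ∈ acc) :
    l.foldl (fun a e => if e ∈ a then a else a ++ [e]) acc = acc := by
  induction l with
  | nil => rfl
  | cons a t ih =>
    have : a ∈ acc := h a (by simp)
    simp only [List.foldl_cons, this, if_pos]
    exact ih (fun x hx => h x (by simp [hx]))

theorem foldl_dedup_cons (y : List Char) (d : Char) (hd : d ∉ y) :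
    ∀ acc, y.foldl (fun a e => if e ∈ a then a else a ++ [e]) (d :: acc)
      = d :: y.foldl (fun a e => if e ∈ a then a else a ++ [e]) acc := by
  induction y with
  | nil => intro acc; rfl
  | cons a t ih =>
    intro acc
    have hne : a ≠ d := by rintro rfl; exact hd (by simp)
    have hdt : d ∉ t := fun h => hd (by simp [h])
    by_cases h : a ∈ acc
    · simp only [List.foldl_cons, List.mem_cons, hne, false_or, h, if_pos]
      exact ih hdt acc
    · have hnd : a ∉ (d :: acc) := by simp [hne, h]
      simp only [List.foldl_cons, hnd, if_neg h]
      have hc : d :: acc ++ [a] = d :: (acc ++ [a]) := by simp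
      rw [hc]
      exact ih hdt (acc ++ [a])

-- runCheck returns 0 once a seen character is still ahead
theorem runCheck_zero (n : Nat) : ∀ l : List Char, l.length ≤ n → ∀ seen c, c ∈ l →
    PySem.Set.contains seen c = true → runCheck l seen = 0 := by
  induction n with
  | zero => intro l hl seen c hc _; simp at hl; subst hl; cases hc
  | succ n ih =>
    intro l hl seen c hc hseen
    match l with
    | [] => cases hc
    | d :: t =>
      rw [runCheck]
      by_cases hd : PySem.Set.contains seen d = true
      · rw [if_pos hd]
      · rw [if_neg hd]
        have hcd : c ≠ d := by rintro rfl; exact hd hseen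
        have hct : c ∈ t := by
          rcases List.mem_cons.mp hc with h | h
          · exact absurd h hcd
          · exact h
        have hcdw : c ∈ t.dropWhile (· == d) := by
          have := (List.takeWhile_append_dropWhile (p := (· == d)) (l := t))
          rw [← this] at hct
          rcases List.mem_append.mp hct with h | h
          · have := List.mem_takeWhile_imp h
            simp at this
            exact absurd this hcd
          · exact h
        have hlen : (t.dropWhile (· == d)).length ≤ n := by
          have := List.length_dropWhile_le (· == d) t
          simp at hl; omega
        have hseen' : PySem.Set.contains (PySem.Set.add seen d) c = true := by
          rw [PySem.Set.contains_iff] at hseen ⊢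
          exact (PySem.Set.mem_add _ _ _).mpr (Or.inl hseen)
        exact ih _ hlen _ c hcdw hseen'

-- B skips within a run
theorem checkAltLoop_skip (t : List Char) (p : Char) (seen : PySem.Set Char) :
    checkAltLoop t (some p) seen = checkAltLoop (t.dropWhile (· == p)) (some p) seen := by
  induction t with
  | nil => rfl
  | cons a t ih =>
    by_cases h : a = p
    · subst h
      rw [checkAltLoop, if_neg (by simp), List.dropWhile_cons_of_pos (by simp)]
      exact ih
    · rw [List.dropWhile_cons_of_neg (by simpa using h)]

-- B equals runCheck when the head does not continue the previous run
theorem checkAltLoop_eq_runCheck (n : Nat) : ∀ l : List Char, l.length ≤ n →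
    ∀ prev seen, (∀ c, l.head? = some c → prev ≠ some c) →
    checkAltLoop l prev seen = runCheck l seen := by
  induction n with
  | zero => intro l hl _ _ _; simp at hl; subst hl; simp [checkAltLoop, runCheck]
  | succ n ih =>
    intro l hl prev seen hh
    match l with
    | [] => simp [checkAltLoop, runCheck]
    | c :: t =>
      have h8 : prev ≠ some c := hh c rfl
      rw [checkAltLoop, runCheck, if_pos (Ne.symm h8)]
      by_cases hc : PySem.Set.contains seen c = true
      · rw [if_pos hc, if_pos hc]
      · rw [if_neg hc, if_neg hc, checkAltLoop_skip]
        apply ih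
        · have := List.length_dropWhile_le (· == c) t
          simp at hl; omega
        · intro d hd hcontra
          injection hcontra with hcd
          subst hcd
          have := List.head?_dropWhile_not (p := (· == c)) (l := t)
          rw [hd] at this
          simp at this

-- A equals runCheck under the invariant that no already-seen character is left in the string
theorem checkLoop_eq_runCheck (n : Nat) : ∀ cur : List Char, cur.length ≤ n →
    ∀ seen : PySem.Set Char, (∀ x ∈ cur, PySem.Set.contains seen x = false) →
    checkLoop (cur.foldl (fun a e => if e ∈ a then a else a ++ [e]) []) cur
      = runCheck cur seen := by
  induction n with
  | zero =>
    intro cur hl seen _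
    simp at hl; subst hl; simp [checkLoop, runCheck]
  | succ n ih =>
    intro cur hl seen hdisj
    match cur with
    | [] => simp [checkLoop, runCheck]
    | c :: t =>
      set tw := t.takeWhile (· == c) with htw
      set dw := t.dropWhile (· == c) with hdw
      -- the dedup fold on c :: t
      have hfold : (c :: t).foldl (fun a e => if e ∈ a then a else a ++ [e]) []
          = t.foldl (fun a e => if e ∈ a then a else a ++ [e]) [c] := by
        simp [List.foldl_cons]
      obtain ⟨z, hz⟩ := foldl_dedup_prefix t [c]
      have helems : (c :: t).foldl (fun a e => if e ∈ a then a else a ++ [e]) [] = c :: z := by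
        rw [hfold, hz]; rfl
      -- the index / advance / slice computation of A's loop body
      have hj : List.idxOf c (c :: t) = 0 := by simp
      have hadv : checkAdvance (c :: t) c 0 = ((c :: t).takeWhile (· == c)).length := by
        simpa using checkAdvance_eq (c :: t) c 0
      have hs' : (c :: t).take 0 ++ (c :: t).drop (((c :: t).takeWhile (· == c)).length) = dw := by
        rw [List.take_zero, List.nil_append, drop_length_takeWhile]
        rw [List.dropWhile_cons_of_pos (by simp)]
      have hLHS : checkLoop (c :: z) (c :: t) = if c ∈ dw then 0 else checkLoop z dw := by
        rw [checkLoop]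
        simp only [hj, hadv, hs']
      have hcseen : PySem.Set.contains seen c = false := hdisj c (by simp)
      have hcmem : c ∉ seen := fun h => by
        have := (PySem.Set.contains_iff _ _).mpr h
        rw [hcseen] at this; cases this
      have hRHS : runCheck (c :: t) seen = runCheck dw (PySem.Set.add seen c) := by
        rw [runCheck, if_neg (by simp [hcmem])]
      rw [helems, hLHS, hRHS]
      have hdwt : ∀ x ∈ dw, x ∈ t := fun x hx => (List.dropWhile_sublist (· == c)).subset hx
      have hlen : dw.length ≤ n := by
        have hle : dw.length ≤ t.length := List.length_dropWhile_le _ _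
        simp at hl; omega
      by_cases hcdw : c ∈ dw
      · rw [if_pos hcdw]
        refine (runCheck_zero n dw hlen _ c hcdw ?_).symm
        rw [PySem.Set.contains_iff]
        exact (PySem.Set.mem_add _ _ _).mpr (Or.inr rfl)
      · rw [if_neg hcdw]
        have hzdw : z = dw.foldl (fun a e => if e ∈ a then a else a ++ [e]) [] := by
          have ht : t = tw ++ dw := (List.takeWhile_append_dropWhile).symm
          have hmemtw : ∀ x ∈ tw, x ∈ ([c] : List Char) := by
            intro x hx
            have := List.mem_takeWhile_imp hx
            simp at this; simp [this]
          have h1 : t.foldl (fun a e => if e ∈ a then a else a ++ [e]) [c]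
              = dw.foldl (fun a e => if e ∈ a then a else a ++ [e]) [c] := by
            rw [ht, List.foldl_append, foldl_dedup_all_mem tw [c] hmemtw]
          have h2 := foldl_dedup_cons dw c hcdw []
          have h3 : [c] ++ z = c :: dw.foldl (fun a e => if e ∈ a then a else a ++ [e]) [] := by
            rw [← hz, h1, h2]
          simpa using h3
        rw [hzdw]
        apply ih dw hlen
        intro x hx
        have hxc : x ≠ c := fun h => hcdw (h ▸ hx)
        have hxs : PySem.Set.contains seen x = false := hdisj x (by simp [hdwt x hx])
        rw [← Bool.not_eq_true, PySem.Set.contains_iff]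
        intro hmem
        rcases (PySem.Set.mem_add _ _ _).mp hmem with h | h
        · have := (PySem.Set.contains_iff _ _).mpr h
          rw [hxs] at this; cases this
        · exact hxc h

-- ===== VERDICT (by name: the statement is the Claim_ definition above) =====
theorem check_spec : Claim_equal_check := by
  intro s _
  unfold Spec_check check check_alt
  have hA := checkLoop_eq_runCheck s.toList.length s.toList le_rfl PySem.Set.empty
    (by intro x _; rfl)
  have hB := checkAltLoop_eq_runCheck s.toList.length s.toList le_rfl none PySem.Set.empty
    (by intro c _ h; cases h)
  simp only [hA, hB]
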